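-- pv_equiv track=rewrite | github.com/OlivierThabet/HexGameAI | ProjetHex/Hex/test.py | _get_template_IV_instances
-- ===== SOURCE A (Python) =====
-- def _cell(r: int, c: int, n: int) -> int:
--     if 0 <= r < n and 0 <= c < n:
--         return r * n + c
--     return -1
--
-- def _get_template_IV_instances(n: int, piece: str):
--     """
--     Template IV-1-a (defendable): stone on row 3, carrier on rows 0-2.
--     Returns (stone_idx, all_carrier, key0, key1).
--     """
--     insts = []
--
--     def _try(stone, cells, k0, k1):
--         if stone >= 0 and k0 >= 0 and k1 >= 0 and all(x >= 0 for x in cells):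
--             insts.append((stone, cells, k0, k1))
--
--     if piece == "R":
--         for c in range(n):
--             s = _cell(3, c, n)
--             k0 = _cell(2, c, n)
--             k1 = _cell(2, c + 1, n)
--             rest = [_cell(1, c, n), _cell(1, c+1, n), _cell(1, c+2, n),
--                     _cell(0, c, n), _cell(0, c+1, n), _cell(0, c+2, n), _cell(0, c+3, n)]
--             _try(s, [k0, k1] + rest, k0, k1)
--             k0m = _cell(2, c - 1, n)
--             k1m = _cell(2, c, n)
--             restm = [_cell(1, c-2, n), _cell(1, c-1, n), _cell(1, c, n),
--                      _cell(0, c-3, n), _cell(0, c-2, n), _cell(0, c-1, n), _cell(0, c, n)]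
--             _try(s, [k0m, k1m] + restm, k0m, k1m)
--         for c in range(n):
--             s = _cell(n - 4, c, n)
--             k0 = _cell(n-3, c-1, n)
--             k1 = _cell(n-3, c, n)
--             rest = [_cell(n-2, c-2, n), _cell(n-2, c-1, n), _cell(n-2, c, n),
--                     _cell(n-1, c-3, n), _cell(n-1, c-2, n), _cell(n-1, c-1, n), _cell(n-1, c, n)]
--             _try(s, [k0, k1] + rest, k0, k1)
--             k0m = _cell(n-3, c, n)
--             k1m = _cell(n-3, c+1, n)
--             restm = [_cell(n-2, c, n), _cell(n-2, c+1, n), _cell(n-2, c+2, n),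
--                      _cell(n-1, c, n), _cell(n-1, c+1, n), _cell(n-1, c+2, n), _cell(n-1, c+3, n)]
--             _try(s, [k0m, k1m] + restm, k0m, k1m)
--     else:
--         for r in range(n):
--             s = _cell(r, 3, n)
--             k0 = _cell(r, 2, n)
--             k1 = _cell(r + 1, 2, n)
--             rest = [_cell(r, 1, n), _cell(r+1, 1, n), _cell(r+2, 1, n),
--                     _cell(r, 0, n), _cell(r+1, 0, n), _cell(r+2, 0, n), _cell(r+3, 0, n)]
--             _try(s, [k0, k1] + rest, k0, k1)
--             k0m = _cell(r - 1, 2, n)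
--             k1m = _cell(r, 2, n)
--             restm = [_cell(r-2, 1, n), _cell(r-1, 1, n), _cell(r, 1, n),
--                      _cell(r-3, 0, n), _cell(r-2, 0, n), _cell(r-1, 0, n), _cell(r, 0, n)]
--             _try(s, [k0m, k1m] + restm, k0m, k1m)
--         for r in range(n):
--             s = _cell(r, n - 4, n)
--             k0 = _cell(r - 1, n-3, n)
--             k1 = _cell(r, n-3, n)
--             rest = [_cell(r-2, n-2, n), _cell(r-1, n-2, n), _cell(r, n-2, n),
--                     _cell(r-3, n-1, n), _cell(r-2, n-1, n), _cell(r-1, n-1, n), _cell(r, n-1, n)]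
--             _try(s, [k0, k1] + rest, k0, k1)
--             k0m = _cell(r, n-3, n)
--             k1m = _cell(r + 1, n-3, n)
--             restm = [_cell(r, n-2, n), _cell(r+1, n-2, n), _cell(r+2, n-2, n),
--                      _cell(r, n-1, n), _cell(r+1, n-1, n), _cell(r+2, n-1, n), _cell(r+3, n-1, n)]
--             _try(s, [k0m, k1m] + restm, k0m, k1m)
--     return insts
-- ===== SOURCE B (Python) =====
-- def _get_template_IV_instances(n: int, piece: str):
--     """
--     Template IV-1-a (defendable): stone on row 3, carrier on rows 0-2.
--     Returns (stone_idx, all_carrier, key0, key1).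
--
--     Closed-form version: instead of probing every cell and filtering the
--     off-board ones, the valid scan-index interval of each mirrored pattern
--     is computed once ([0, n-4] for the forward pattern, [3, n-1] for the
--     mirrored one), cell indices are produced by plain arithmetic, and the
--     two streams of each edge are merged by scan index (two pointers).
--     """
--     if n < 4:
--         return []
--
--     def f(line, s):
--         # linear index of (line, s): 'line' is the fixed coordinate of the
--         # template row, 's' the scanned one; transposed when piece != "R".
--         return line * n + s if piece == "R" else s * n + line
--
--     def inst(base, d, sign, s):
--         b1, b2, b3 = base + d, base + 2 * d, base + 3 * d
--         if sign > 0: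
--             k0, k1 = f(b1, s), f(b1, s + 1)
--             rest = [f(b2, s), f(b2, s + 1), f(b2, s + 2),
--                     f(b3, s), f(b3, s + 1), f(b3, s + 2), f(b3, s + 3)]
--         else:
--             k0, k1 = f(b1, s - 1), f(b1, s)
--             rest = [f(b2, s - 2), f(b2, s - 1), f(b2, s),
--                     f(b3, s - 3), f(b3, s - 2), f(b3, s - 1), f(b3, s)]
--         return (f(base, s), [k0, k1] + rest, k0, k1)
--
--     def merge(xs, ys):
--         # merge two key-ascending (key, inst) streams; ties take xs first
--         out, i, j = [], 0, 0
--         while i < len(xs) and j < len(ys):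
--             if xs[i][0] <= ys[j][0]:
--                 out.append(xs[i][1]); i += 1
--             else:
--                 out.append(ys[j][1]); j += 1
--         out.extend(t for _, t in xs[i:])
--         out.extend(t for _, t in ys[j:])
--         return out
--
--     top = merge([(s, inst(3, -1, +1, s)) for s in range(0, n - 3)],
--                 [(s, inst(3, -1, -1, s)) for s in range(3, n)])
--     bot = merge([(s, inst(n - 4, 1, -1, s)) for s in range(3, n)],
--                 [(s, inst(n - 4, 1, +1, s)) for s in range(0, n - 3)])
--     return top + bot
-- ===== Notes on version B (the rewrite author's own statement) =====
-- stated objective: alternative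
-- what changed: Replaced A's generate-and-filter scan (probe every cell with a bounds-checking _cell and drop instances containing -1) by a closed-form construction: the valid scan-index interval of each mirrored pattern is computed once ([0,n-4] forward, [3,n-1] mirrored), cell indices are produced by plain arithmetic with no bounds checks, and the two streams per edge are merged by scan index with a two-pointer merge.
import Mathlib
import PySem

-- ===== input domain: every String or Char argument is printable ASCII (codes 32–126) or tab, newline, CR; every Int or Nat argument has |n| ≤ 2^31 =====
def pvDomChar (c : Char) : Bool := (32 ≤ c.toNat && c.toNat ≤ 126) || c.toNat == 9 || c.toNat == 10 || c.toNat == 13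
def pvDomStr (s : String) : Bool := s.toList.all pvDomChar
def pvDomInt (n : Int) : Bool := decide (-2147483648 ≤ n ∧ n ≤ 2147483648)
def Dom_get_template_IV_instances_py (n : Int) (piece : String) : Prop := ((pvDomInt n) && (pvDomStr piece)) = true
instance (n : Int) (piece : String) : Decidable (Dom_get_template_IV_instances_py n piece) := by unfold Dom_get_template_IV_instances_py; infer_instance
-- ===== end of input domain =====

-- B replaces A's generate-and-filter scan (probe every cell, drop instances containing -1)
-- by closed-form valid scan intervals, plain-arithmetic cell indices and a two-pointer merge
-- of the two pattern streams per edge (alternative decomposition, same O(n) cost).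

-- ===== PORT A =====
-- _cell(r, c, n)
def pvCell (r c n : Int) : Int :=
  if 0 ≤ r ∧ r < n ∧ 0 ≤ c ∧ c < n then r * n + c else -1

-- _try: conditional append onto insts
def pvTry (insts : List (Int × List Int × Int × Int)) (stone : Int) (cells : List Int)
    (k0 k1 : Int) : List (Int × List Int × Int × Int) :=
  if 0 ≤ stone ∧ 0 ≤ k0 ∧ 0 ≤ k1 ∧ ∀ x ∈ cells, 0 ≤ x then
    insts ++ [(stone, cells, k0, k1)]
  else insts

def get_template_IV_instances_py (n : Int) (piece : String) : List (Int × List Int × Int × Int) :=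
  if piece == "R" then
    let insts1 := (PySem.List.pyRange 0 n 1).foldl (fun insts c =>
      let s := pvCell 3 c n
      let k0 := pvCell 2 c n
      let k1 := pvCell 2 (c + 1) n
      let rest := [pvCell 1 c n, pvCell 1 (c+1) n, pvCell 1 (c+2) n,
                   pvCell 0 c n, pvCell 0 (c+1) n, pvCell 0 (c+2) n, pvCell 0 (c+3) n]
      let insts := pvTry insts s ([k0, k1] ++ rest) k0 k1
      let k0m := pvCell 2 (c - 1) n
      let k1m := pvCell 2 c n
      let restm := [pvCell 1 (c-2) n, pvCell 1 (c-1) n, pvCell 1 c n,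
                    pvCell 0 (c-3) n, pvCell 0 (c-2) n, pvCell 0 (c-1) n, pvCell 0 c n]
      pvTry insts s ([k0m, k1m] ++ restm) k0m k1m) []
    (PySem.List.pyRange 0 n 1).foldl (fun insts c =>
      let s := pvCell (n - 4) c n
      let k0 := pvCell (n-3) (c-1) n
      let k1 := pvCell (n-3) c n
      let rest := [pvCell (n-2) (c-2) n, pvCell (n-2) (c-1) n, pvCell (n-2) c n,
                   pvCell (n-1) (c-3) n, pvCell (n-1) (c-2) n, pvCell (n-1) (c-1) n, pvCell (n-1) c n]
      let insts := pvTry insts s ([k0, k1] ++ rest) k0 k1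
      let k0m := pvCell (n-3) c n
      let k1m := pvCell (n-3) (c+1) n
      let restm := [pvCell (n-2) c n, pvCell (n-2) (c+1) n, pvCell (n-2) (c+2) n,
                    pvCell (n-1) c n, pvCell (n-1) (c+1) n, pvCell (n-1) (c+2) n, pvCell (n-1) (c+3) n]
      pvTry insts s ([k0m, k1m] ++ restm) k0m k1m) insts1
  else
    let insts1 := (PySem.List.pyRange 0 n 1).foldl (fun insts r =>
      let s := pvCell r 3 n
      let k0 := pvCell r 2 n
      let k1 := pvCell (r + 1) 2 n
      let rest := [pvCell r 1 n, pvCell (r+1) 1 n, pvCell (r+2) 1 n,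
                   pvCell r 0 n, pvCell (r+1) 0 n, pvCell (r+2) 0 n, pvCell (r+3) 0 n]
      let insts := pvTry insts s ([k0, k1] ++ rest) k0 k1
      let k0m := pvCell (r - 1) 2 n
      let k1m := pvCell r 2 n
      let restm := [pvCell (r-2) 1 n, pvCell (r-1) 1 n, pvCell r 1 n,
                    pvCell (r-3) 0 n, pvCell (r-2) 0 n, pvCell (r-1) 0 n, pvCell r 0 n]
      pvTry insts s ([k0m, k1m] ++ restm) k0m k1m) []
    (PySem.List.pyRange 0 n 1).foldl (fun insts r =>
      let s := pvCell r (n - 4) n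
      let k0 := pvCell (r-1) (n-3) n
      let k1 := pvCell r (n-3) n
      let rest := [pvCell (r-2) (n-2) n, pvCell (r-1) (n-2) n, pvCell r (n-2) n,
                   pvCell (r-3) (n-1) n, pvCell (r-2) (n-1) n, pvCell (r-1) (n-1) n, pvCell r (n-1) n]
      let insts := pvTry insts s ([k0, k1] ++ rest) k0 k1
      let k0m := pvCell r (n-3) n
      let k1m := pvCell (r + 1) (n-3) n
      let restm := [pvCell r (n-2) n, pvCell (r+1) (n-2) n, pvCell (r+2) (n-2) n,
                    pvCell r (n-1) n, pvCell (r+1) (n-1) n, pvCell (r+2) (n-1) n, pvCell (r+3) (n-1) n]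
      pvTry insts s ([k0m, k1m] ++ restm) k0m k1m) insts1

-- ===== PORT B =====
-- Source B's f(line, s): linear index, transposed when piece != "R" (no bounds check)
def pvLin (piece : String) (n line s : Int) : Int :=
  if piece == "R" then line * n + s else s * n + line

-- Source B's inst(base, d, sign, s)
def pvInst (piece : String) (n base d sign s : Int) : Int × List Int × Int × Int :=
  let b1 := base + d
  let b2 := base + 2 * d
  let b3 := base + 3 * d
  if 0 < sign then
    let k0 := pvLin piece n b1 s
    let k1 := pvLin piece n b1 (s + 1)
    let rest := [pvLin piece n b2 s, pvLin piece n b2 (s + 1), pvLin piece n b2 (s + 2),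
                 pvLin piece n b3 s, pvLin piece n b3 (s + 1), pvLin piece n b3 (s + 2), pvLin piece n b3 (s + 3)]
    (pvLin piece n base s, [k0, k1] ++ rest, k0, k1)
  else
    let k0 := pvLin piece n b1 (s - 1)
    let k1 := pvLin piece n b1 s
    let rest := [pvLin piece n b2 (s - 2), pvLin piece n b2 (s - 1), pvLin piece n b2 s,
                 pvLin piece n b3 (s - 3), pvLin piece n b3 (s - 2), pvLin piece n b3 (s - 1), pvLin piece n b3 s]
    (pvLin piece n base s, [k0, k1] ++ rest, k0, k1)

-- Source B's merge: two-pointer merge of two key-ascending streams, ties take the first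
def pvMerge {α : Type} : List (Int × α) → List (Int × α) → List α
  | [], ys => ys.map Prod.snd
  | x :: xs, [] => (x :: xs).map Prod.snd
  | (kx, x) :: xs, (ky, y) :: ys =>
      if kx ≤ ky then x :: pvMerge xs ((ky, y) :: ys)
      else y :: pvMerge ((kx, x) :: xs) ys
termination_by xs ys => xs.length + ys.length
decreasing_by all_goals simp

def get_template_IV_instances_py_alt (n : Int) (piece : String) : List (Int × List Int × Int × Int) :=
  if n < 4 then []
  else
    let top := pvMerge
      ((PySem.List.pyRange 0 (n-3) 1).map (fun s => (s, pvInst piece n 3 (-1) 1 s)))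
      ((PySem.List.pyRange 3 n 1).map (fun s => (s, pvInst piece n 3 (-1) (-1) s)))
    let bot := pvMerge
      ((PySem.List.pyRange 3 n 1).map (fun s => (s, pvInst piece n (n-4) 1 (-1) s)))
      ((PySem.List.pyRange 0 (n-3) 1).map (fun s => (s, pvInst piece n (n-4) 1 1 s)))
    top ++ bot

-- ===== PRECONDITION & SPEC =====
def Spec_get_template_IV_instances_py (n : Int) (piece : String) (out : List (Int × List Int × Int × Int)) : Prop := out = get_template_IV_instances_py_alt n piece
instance (n : Int) (piece : String) (out : List (Int × List Int × Int × Int)) : Decidable (Spec_get_template_IV_instances_py n piece out) := by unfold Spec_get_template_IV_instances_py; infer_instance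

-- ===== CLAIM (what is proved, stated in full; the proofs are below) =====
def Claim_equal_get_template_IV_instances_py : Prop := ∀ (n : Int) (piece : String), Dom_get_template_IV_instances_py n piece → Spec_get_template_IV_instances_py n piece (get_template_IV_instances_py n piece)

-- ===== LEMMAS AND PROOFS =====

-- linear index / bounds-checked cell, with the two coordinate orders unified by a Bool
def gL (tr : Bool) (n r s : Int) : Int := if tr then r * n + s else s * n + r
def gC (tr : Bool) (n r s : Int) : Int := if tr then pvCell r s n else pvCell s r n

theorem gC_true (n r s : Int) : pvCell r s n = gC true n r s := rfl
theorem gC_false (n r s : Int) : pvCell s r n = gC false n r s := rfl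

theorem gL_eq_pvLin (piece : String) (n r s : Int) : pvLin piece n r s = gL (piece == "R") n r s := rfl

theorem gC_nonneg (tr : Bool) (n r s : Int) :
    0 ≤ gC tr n r s ↔ (0 ≤ r ∧ r < n ∧ 0 ≤ s ∧ s < n) := by
  cases tr <;> simp only [gC, pvCell, if_true, if_false, Bool.false_eq_true] <;>
    split_ifs with h <;> constructor <;> intro h2
  · omega
  · have hn : 0 ≤ n := by omega
    have := mul_nonneg h2.2.2.1 hn
    omega
  · omega
  · omega
  · omega
  · have hn : 0 ≤ n := by omega
    have := mul_nonneg h2.1 hn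
    omega
  · omega
  · omega

theorem gC_pos (tr : Bool) (n r s : Int) (hr0 : 0 ≤ r) (hrn : r < n) (hs0 : 0 ≤ s) (hsn : s < n) :
    gC tr n r s = gL tr n r s := by
  cases tr <;> simp only [gC, gL, pvCell, if_true, if_false, Bool.false_eq_true]
  · rw [if_pos ⟨hs0, hsn, hr0, hrn⟩]
  · rw [if_pos ⟨hr0, hrn, hs0, hsn⟩]

-- the optional-singleton form of A's _try
def optTry (s : Int) (cells : List Int) (k0 k1 : Int) : List (Int × List Int × Int × Int) :=
  if 0 ≤ s ∧ 0 ≤ k0 ∧ 0 ≤ k1 ∧ ∀ x ∈ cells, 0 ≤ x then [(s, cells, k0, k1)] else []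

theorem pvTry_eq (insts : List (Int × List Int × Int × Int)) (s : Int) (cells : List Int) (k0 k1 : Int) :
    pvTry insts s cells k0 k1 = insts ++ optTry s cells k0 k1 := by
  unfold pvTry optTry; split_ifs <;> simp

-- A's whole computation as two flatMaps over the scan range, coordinate order abstracted
def ABlock (tr : Bool) (n : Int) : List (Int × List Int × Int × Int) :=
  (PySem.List.pyRange 0 n 1).flatMap (fun c =>
    optTry (gC tr n 3 c)
      [gC tr n 2 c, gC tr n 2 (c+1), gC tr n 1 c, gC tr n 1 (c+1), gC tr n 1 (c+2),
       gC tr n 0 c, gC tr n 0 (c+1), gC tr n 0 (c+2), gC tr n 0 (c+3)]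
      (gC tr n 2 c) (gC tr n 2 (c+1))
    ++ optTry (gC tr n 3 c)
      [gC tr n 2 (c-1), gC tr n 2 c, gC tr n 1 (c-2), gC tr n 1 (c-1), gC tr n 1 c,
       gC tr n 0 (c-3), gC tr n 0 (c-2), gC tr n 0 (c-1), gC tr n 0 c]
      (gC tr n 2 (c-1)) (gC tr n 2 c))
  ++ (PySem.List.pyRange 0 n 1).flatMap (fun c =>
    optTry (gC tr n (n-4) c)
      [gC tr n (n-3) (c-1), gC tr n (n-3) c, gC tr n (n-2) (c-2), gC tr n (n-2) (c-1), gC tr n (n-2) c,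
       gC tr n (n-1) (c-3), gC tr n (n-1) (c-2), gC tr n (n-1) (c-1), gC tr n (n-1) c]
      (gC tr n (n-3) (c-1)) (gC tr n (n-3) c)
    ++ optTry (gC tr n (n-4) c)
      [gC tr n (n-3) c, gC tr n (n-3) (c+1), gC tr n (n-2) c, gC tr n (n-2) (c+1), gC tr n (n-2) (c+2),
       gC tr n (n-1) c, gC tr n (n-1) (c+1), gC tr n (n-1) (c+2), gC tr n (n-1) (c+3)]
      (gC tr n (n-3) c) (gC tr n (n-3) (c+1)))

theorem A_eq_ABlock (n : Int) (piece : String) :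
    get_template_IV_instances_py n piece = ABlock (piece == "R") n := by
  by_cases hp : (piece == "R") = true
  · simp only [get_template_IV_instances_py, ABlock, hp, if_true]
    simp only [pvTry_eq, List.append_assoc, List.cons_append, List.nil_append]
    rw [PySem.List.foldl_append_eq_flatMap, PySem.List.foldl_append_eq_flatMap]
    simp only [List.nil_append, gC_true]
  · rw [Bool.not_eq_true] at hp
    simp only [get_template_IV_instances_py, ABlock, hp, Bool.false_eq_true, if_false]
    simp only [pvTry_eq, List.append_assoc, List.cons_append, List.nil_append]
    rw [PySem.List.foldl_append_eq_flatMap, PySem.List.foldl_append_eq_flatMap]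
    simp only [List.nil_append, gC_false]

-- B's per-pattern tuples written out (piece folded into the Bool)
theorem pvInst_top_plus (piece : String) (n s : Int) :
    pvInst piece n 3 (-1) 1 s =
      (gL (piece == "R") n 3 s,
       [gL (piece == "R") n 2 s, gL (piece == "R") n 2 (s+1), gL (piece == "R") n 1 s,
        gL (piece == "R") n 1 (s+1), gL (piece == "R") n 1 (s+2), gL (piece == "R") n 0 s,
        gL (piece == "R") n 0 (s+1), gL (piece == "R") n 0 (s+2), gL (piece == "R") n 0 (s+3)],
       gL (piece == "R") n 2 s, gL (piece == "R") n 2 (s+1)) := by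
  simp only [pvInst, gL_eq_pvLin]
  norm_num

theorem pvInst_top_minus (piece : String) (n s : Int) :
    pvInst piece n 3 (-1) (-1) s =
      (gL (piece == "R") n 3 s,
       [gL (piece == "R") n 2 (s-1), gL (piece == "R") n 2 s, gL (piece == "R") n 1 (s-2),
        gL (piece == "R") n 1 (s-1), gL (piece == "R") n 1 s, gL (piece == "R") n 0 (s-3),
        gL (piece == "R") n 0 (s-2), gL (piece == "R") n 0 (s-1), gL (piece == "R") n 0 s],
       gL (piece == "R") n 2 (s-1), gL (piece == "R") n 2 s) := by
  simp only [pvInst, gL_eq_pvLin]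
  norm_num

theorem pvInst_bot_minus (piece : String) (n s : Int) :
    pvInst piece n (n-4) 1 (-1) s =
      (gL (piece == "R") n (n-4) s,
       [gL (piece == "R") n (n-3) (s-1), gL (piece == "R") n (n-3) s, gL (piece == "R") n (n-2) (s-2),
        gL (piece == "R") n (n-2) (s-1), gL (piece == "R") n (n-2) s, gL (piece == "R") n (n-1) (s-3),
        gL (piece == "R") n (n-1) (s-2), gL (piece == "R") n (n-1) (s-1), gL (piece == "R") n (n-1) s],
       gL (piece == "R") n (n-3) (s-1), gL (piece == "R") n (n-3) s) := by
  simp only [pvInst, gL_eq_pvLin]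
  norm_num
  rw [show n - 4 + 1 = n - 3 by ring, show n - 4 + 2 = n - 2 by ring,
      show n - 4 + 3 = n - 1 by ring]
  simp

theorem pvInst_bot_plus (piece : String) (n s : Int) :
    pvInst piece n (n-4) 1 1 s =
      (gL (piece == "R") n (n-4) s,
       [gL (piece == "R") n (n-3) s, gL (piece == "R") n (n-3) (s+1), gL (piece == "R") n (n-2) s,
        gL (piece == "R") n (n-2) (s+1), gL (piece == "R") n (n-2) (s+2), gL (piece == "R") n (n-1) s,
        gL (piece == "R") n (n-1) (s+1), gL (piece == "R") n (n-1) (s+2), gL (piece == "R") n (n-1) (s+3)],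
       gL (piece == "R") n (n-3) s, gL (piece == "R") n (n-3) (s+1)) := by
  simp only [pvInst, gL_eq_pvLin]
  norm_num
  rw [show n - 4 + 1 = n - 3 by ring, show n - 4 + 2 = n - 2 by ring,
      show n - 4 + 3 = n - 1 by ring]
  simp

-- empty pyRange
theorem pyRange_one_nil {a b : Int} (h : b ≤ a) : PySem.List.pyRange a b 1 = [] := by
  rw [PySem.List.pyRange_one, show (b - a).toNat = 0 by omega]
  simp

-- pvMerge unfolding helpers
theorem pvMerge_nil {α : Type} (ys : List (Int × α)) : pvMerge [] ys = ys.map Prod.snd := by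
  cases ys <;> simp [pvMerge]

theorem pvMerge_cons_left {α : Type} (k : Int) (x : α) (xs ys : List (Int × α))
    (h : ∀ p ∈ ys, k ≤ p.1) : pvMerge ((k, x) :: xs) ys = x :: pvMerge xs ys := by
  cases ys with
  | nil => cases xs <;> simp [pvMerge, pvMerge_nil]
  | cons y ys' =>
      obtain ⟨ky, yv⟩ := y
      simp only [pvMerge]
      rw [if_pos (h (ky, yv) (by simp))]

theorem pvMerge_cons_right {α : Type} (xs : List (Int × α)) (k : Int) (y : α) (ys : List (Int × α))
    (h : ∀ p ∈ xs, ¬ p.1 ≤ k) : pvMerge xs ((k, y) :: ys) = y :: pvMerge xs ys := by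
  cases xs with
  | nil => simp [pvMerge_nil]
  | cons x xs' =>
      obtain ⟨kx, xv⟩ := x
      simp only [pvMerge]
      rw [if_neg (h (kx, xv) (by simp))]

theorem keys_ge {α : Type} (g : Int → α) (a b k : Int) (h : k ≤ a) :
    ∀ p ∈ (PySem.List.pyRange a b 1).map (fun s => (s, g s)), k ≤ p.1 := by
  intro p hp
  obtain ⟨s, hs, rfl⟩ := List.mem_map.mp hp
  have := (PySem.List.mem_pyRange_one.mp hs).1
  simp only
  omega

theorem keys_gt {α : Type} (g : Int → α) (a b k : Int) (h : k < a) :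
    ∀ p ∈ (PySem.List.pyRange a b 1).map (fun s => (s, g s)), ¬ p.1 ≤ k := by
  intro p hp
  have := keys_ge g a b a le_rfl p hp
  omega

-- merge of the two pattern streams (first stream valid on [c, n-4], second on [3, n-1])
-- equals the interleaved scan, first stream first on ties
theorem merge_fg {α : Type} (f g : Int → α) (n : Int) :
    ∀ c : Int, pvMerge ((PySem.List.pyRange c (n-3) 1).map (fun s => (s, f s)))
            ((PySem.List.pyRange (max c 3) n 1).map (fun s => (s, g s)))
    = (PySem.List.pyRange c n 1).flatMap
        (fun s => (if s < n - 3 then [f s] else []) ++ (if 3 ≤ s then [g s] else [])) := by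
  suffices H : ∀ (m : Nat) (c : Int), (n - c).toNat ≤ m →
      pvMerge ((PySem.List.pyRange c (n-3) 1).map (fun s => (s, f s)))
            ((PySem.List.pyRange (max c 3) n 1).map (fun s => (s, g s)))
      = (PySem.List.pyRange c n 1).flatMap
          (fun s => (if s < n - 3 then [f s] else []) ++ (if 3 ≤ s then [g s] else [])) by
    exact fun c => H (n - c).toNat c le_rfl
  intro m
  induction m with
  | zero =>
      intro c hc
      rw [pyRange_one_nil (by omega : n - 3 ≤ c), pyRange_one_nil (by omega : n ≤ max c 3),
          pyRange_one_nil (by omega : n ≤ c)]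
      simp [pvMerge]
  | succ m ih =>
      intro c hc
      by_cases hcn : c < n
      · rw [PySem.List.pyRange_one_cons hcn, List.flatMap_cons]
        by_cases h3 : 3 ≤ c <;> by_cases h4 : c < n - 3
        · -- both patterns fire at c
          rw [max_eq_left h3, PySem.List.pyRange_one_cons h4, PySem.List.pyRange_one_cons hcn]
          simp only [List.map_cons]
          rw [pvMerge_cons_left _ _ _ _ (by
                intro p hp
                rcases List.mem_cons.mp hp with h | h
                · subst h; simp
                · exact keys_ge g (c+1) n c (by omega) p h),
              pvMerge_cons_right _ _ _ _ (keys_gt f (c+1) (n-3) c (by omega))]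
          have hih := ih (c+1) (by omega)
          rw [max_eq_left (by omega : (3:Int) ≤ c + 1)] at hih
          rw [hih]
          simp [h3, h4]
        · -- only the mirrored pattern fires
          rw [max_eq_left h3, pyRange_one_nil (by omega : n - 3 ≤ c),
              PySem.List.pyRange_one_cons hcn]
          simp only [List.map_nil, List.map_cons]
          rw [pvMerge_cons_right _ _ _ _ (by intro p hp; simp at hp)]
          have hih := ih (c+1) (by omega)
          rw [max_eq_left (by omega : (3:Int) ≤ c + 1),
              pyRange_one_nil (by omega : n - 3 ≤ c + 1)] at hih
          simp only [List.map_nil] at hih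
          rw [hih]
          simp [h3, h4]
        · -- only the forward pattern fires
          rw [max_eq_right (by omega : c ≤ 3), PySem.List.pyRange_one_cons h4]
          simp only [List.map_cons]
          rw [pvMerge_cons_left _ _ _ _ (keys_ge g 3 n c (by omega))]
          have hih := ih (c+1) (by omega)
          rw [max_eq_right (by omega : c + 1 ≤ 3)] at hih
          rw [hih]
          simp [h3, h4]
        · -- neither fires
          rw [max_eq_right (by omega : c ≤ 3), pyRange_one_nil (by omega : n - 3 ≤ c)]
          have hih := ih (c+1) (by omega)
          rw [max_eq_right (by omega : c + 1 ≤ 3),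
              pyRange_one_nil (by omega : n - 3 ≤ c + 1)] at hih
          rw [hih]
          simp [h3, h4]
      · rw [pyRange_one_nil (by omega : n - 3 ≤ c), pyRange_one_nil (by omega : n ≤ max c 3),
            pyRange_one_nil (by omega : n ≤ c)]
        simp [pvMerge]

-- same, with the mirrored stream first (bottom/right edge ordering)
theorem merge_gf {α : Type} (f g : Int → α) (n : Int) :
    ∀ c : Int, pvMerge ((PySem.List.pyRange (max c 3) n 1).map (fun s => (s, g s)))
            ((PySem.List.pyRange c (n-3) 1).map (fun s => (s, f s)))
    = (PySem.List.pyRange c n 1).flatMap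
        (fun s => (if 3 ≤ s then [g s] else []) ++ (if s < n - 3 then [f s] else [])) := by
  suffices H : ∀ (m : Nat) (c : Int), (n - c).toNat ≤ m →
      pvMerge ((PySem.List.pyRange (max c 3) n 1).map (fun s => (s, g s)))
            ((PySem.List.pyRange c (n-3) 1).map (fun s => (s, f s)))
      = (PySem.List.pyRange c n 1).flatMap
          (fun s => (if 3 ≤ s then [g s] else []) ++ (if s < n - 3 then [f s] else [])) by
    exact fun c => H (n - c).toNat c le_rfl
  intro m
  induction m with
  | zero =>
      intro c hc
      rw [pyRange_one_nil (by omega : n - 3 ≤ c), pyRange_one_nil (by omega : n ≤ max c 3),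
          pyRange_one_nil (by omega : n ≤ c)]
      simp [pvMerge]
  | succ m ih =>
      intro c hc
      by_cases hcn : c < n
      · rw [PySem.List.pyRange_one_cons hcn, List.flatMap_cons]
        by_cases h3 : 3 ≤ c <;> by_cases h4 : c < n - 3
        · rw [max_eq_left h3, PySem.List.pyRange_one_cons h4, PySem.List.pyRange_one_cons hcn]
          simp only [List.map_cons]
          rw [pvMerge_cons_left _ _ _ _ (by
                intro p hp
                rcases List.mem_cons.mp hp with h | h
                · subst h; simp
                · exact keys_ge f (c+1) (n-3) c (by omega) p h),
              pvMerge_cons_right _ _ _ _ (keys_gt g (c+1) n c (by omega))]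
          have hih := ih (c+1) (by omega)
          rw [max_eq_left (by omega : (3:Int) ≤ c + 1)] at hih
          rw [hih]
          simp [h3, h4]
        · rw [max_eq_left h3, pyRange_one_nil (by omega : n - 3 ≤ c),
              PySem.List.pyRange_one_cons hcn]
          simp only [List.map_nil, List.map_cons]
          rw [pvMerge_cons_left _ _ _ _ (by intro p hp; simp at hp)]
          have hih := ih (c+1) (by omega)
          rw [max_eq_left (by omega : (3:Int) ≤ c + 1),
              pyRange_one_nil (by omega : n - 3 ≤ c + 1)] at hih
          simp only [List.map_nil] at hih
          rw [hih]
          simp [h3, h4]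
        · rw [max_eq_right (by omega : c ≤ 3), PySem.List.pyRange_one_cons h4]
          simp only [List.map_cons]
          rw [pvMerge_cons_right _ _ _ _ (keys_gt g 3 n c (by omega))]
          have hih := ih (c+1) (by omega)
          rw [max_eq_right (by omega : c + 1 ≤ 3)] at hih
          rw [hih]
          simp [h3, h4]
        · rw [max_eq_right (by omega : c ≤ 3), pyRange_one_nil (by omega : n - 3 ≤ c)]
          have hih := ih (c+1) (by omega)
          rw [max_eq_right (by omega : c + 1 ≤ 3),
              pyRange_one_nil (by omega : n - 3 ≤ c + 1)] at hih
          rw [hih]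
          simp [h3, h4]
      · rw [pyRange_one_nil (by omega : n - 3 ≤ c), pyRange_one_nil (by omega : n ≤ max c 3),
            pyRange_one_nil (by omega : n ≤ c)]
        simp [pvMerge]

-- the forward pattern of A's _try is the if-guarded singleton with guard c ≤ n-4
theorem opt_plus (tr : Bool) (n L0 L1 L2 L3 c : Int)
    (hL : 0 ≤ L0 ∧ L0 < n ∧ 0 ≤ L1 ∧ L1 < n ∧ 0 ≤ L2 ∧ L2 < n ∧ 0 ≤ L3 ∧ L3 < n)
    (hc : 0 ≤ c ∧ c < n) :
    optTry (gC tr n L0 c)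
      [gC tr n L1 c, gC tr n L1 (c+1), gC tr n L2 c, gC tr n L2 (c+1), gC tr n L2 (c+2),
       gC tr n L3 c, gC tr n L3 (c+1), gC tr n L3 (c+2), gC tr n L3 (c+3)]
      (gC tr n L1 c) (gC tr n L1 (c+1))
    = if c < n - 3 then
        [(gL tr n L0 c,
          [gL tr n L1 c, gL tr n L1 (c+1), gL tr n L2 c, gL tr n L2 (c+1), gL tr n L2 (c+2),
           gL tr n L3 c, gL tr n L3 (c+1), gL tr n L3 (c+2), gL tr n L3 (c+3)],
          gL tr n L1 c, gL tr n L1 (c+1))]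
      else [] := by
  unfold optTry
  simp only [List.mem_cons, List.not_mem_nil, or_false, forall_eq_or_imp, forall_eq, gC_nonneg]
  split_ifs with h1 h2 h2
  · rw [gC_pos tr n L0 c (by omega) (by omega) (by omega) (by omega),
        gC_pos tr n L1 c (by omega) (by omega) (by omega) (by omega),
        gC_pos tr n L1 (c+1) (by omega) (by omega) (by omega) (by omega),
        gC_pos tr n L2 c (by omega) (by omega) (by omega) (by omega),
        gC_pos tr n L2 (c+1) (by omega) (by omega) (by omega) (by omega),
        gC_pos tr n L2 (c+2) (by omega) (by omega) (by omega) (by omega),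
        gC_pos tr n L3 c (by omega) (by omega) (by omega) (by omega),
        gC_pos tr n L3 (c+1) (by omega) (by omega) (by omega) (by omega),
        gC_pos tr n L3 (c+2) (by omega) (by omega) (by omega) (by omega),
        gC_pos tr n L3 (c+3) (by omega) (by omega) (by omega) (by omega)]
  · exact absurd (by omega : c < n - 3) h2
  · exact absurd (by omega :
      (0 ≤ L0 ∧ L0 < n ∧ 0 ≤ c ∧ c < n) ∧
      (0 ≤ L1 ∧ L1 < n ∧ 0 ≤ c ∧ c < n) ∧
      (0 ≤ L1 ∧ L1 < n ∧ 0 ≤ c + 1 ∧ c + 1 < n) ∧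
      (0 ≤ L1 ∧ L1 < n ∧ 0 ≤ c ∧ c < n) ∧
      (0 ≤ L1 ∧ L1 < n ∧ 0 ≤ c + 1 ∧ c + 1 < n) ∧
      (0 ≤ L2 ∧ L2 < n ∧ 0 ≤ c ∧ c < n) ∧
      (0 ≤ L2 ∧ L2 < n ∧ 0 ≤ c + 1 ∧ c + 1 < n) ∧
      (0 ≤ L2 ∧ L2 < n ∧ 0 ≤ c + 2 ∧ c + 2 < n) ∧
      (0 ≤ L3 ∧ L3 < n ∧ 0 ≤ c ∧ c < n) ∧
      (0 ≤ L3 ∧ L3 < n ∧ 0 ≤ c + 1 ∧ c + 1 < n) ∧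
      (0 ≤ L3 ∧ L3 < n ∧ 0 ≤ c + 2 ∧ c + 2 < n) ∧
      (0 ≤ L3 ∧ L3 < n ∧ 0 ≤ c + 3 ∧ c + 3 < n)) h1
  · rfl

-- the mirrored pattern is the if-guarded singleton with guard 3 ≤ c
theorem opt_minus (tr : Bool) (n L0 L1 L2 L3 c : Int)
    (hL : 0 ≤ L0 ∧ L0 < n ∧ 0 ≤ L1 ∧ L1 < n ∧ 0 ≤ L2 ∧ L2 < n ∧ 0 ≤ L3 ∧ L3 < n)
    (hc : 0 ≤ c ∧ c < n) :
    optTry (gC tr n L0 c)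
      [gC tr n L1 (c-1), gC tr n L1 c, gC tr n L2 (c-2), gC tr n L2 (c-1), gC tr n L2 c,
       gC tr n L3 (c-3), gC tr n L3 (c-2), gC tr n L3 (c-1), gC tr n L3 c]
      (gC tr n L1 (c-1)) (gC tr n L1 c)
    = if 3 ≤ c then
        [(gL tr n L0 c,
          [gL tr n L1 (c-1), gL tr n L1 c, gL tr n L2 (c-2), gL tr n L2 (c-1), gL tr n L2 c,
           gL tr n L3 (c-3), gL tr n L3 (c-2), gL tr n L3 (c-1), gL tr n L3 c],
          gL tr n L1 (c-1), gL tr n L1 c)]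
      else [] := by
  unfold optTry
  simp only [List.mem_cons, List.not_mem_nil, or_false, forall_eq_or_imp, forall_eq, gC_nonneg]
  split_ifs with h1 h2 h2
  · rw [gC_pos tr n L0 c (by omega) (by omega) (by omega) (by omega),
        gC_pos tr n L1 (c-1) (by omega) (by omega) (by omega) (by omega),
        gC_pos tr n L1 c (by omega) (by omega) (by omega) (by omega),
        gC_pos tr n L2 (c-2) (by omega) (by omega) (by omega) (by omega),
        gC_pos tr n L2 (c-1) (by omega) (by omega) (by omega) (by omega),
        gC_pos tr n L2 c (by omega) (by omega) (by omega) (by omega),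
        gC_pos tr n L3 (c-3) (by omega) (by omega) (by omega) (by omega),
        gC_pos tr n L3 (c-2) (by omega) (by omega) (by omega) (by omega),
        gC_pos tr n L3 (c-1) (by omega) (by omega) (by omega) (by omega),
        gC_pos tr n L3 c (by omega) (by omega) (by omega) (by omega)]
  · exact absurd (by omega : (3:Int) ≤ c) h2
  · exact absurd (by omega :
      (0 ≤ L0 ∧ L0 < n ∧ 0 ≤ c ∧ c < n) ∧
      (0 ≤ L1 ∧ L1 < n ∧ 0 ≤ c - 1 ∧ c - 1 < n) ∧
      (0 ≤ L1 ∧ L1 < n ∧ 0 ≤ c ∧ c < n) ∧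
      (0 ≤ L1 ∧ L1 < n ∧ 0 ≤ c - 1 ∧ c - 1 < n) ∧
      (0 ≤ L1 ∧ L1 < n ∧ 0 ≤ c ∧ c < n) ∧
      (0 ≤ L2 ∧ L2 < n ∧ 0 ≤ c - 2 ∧ c - 2 < n) ∧
      (0 ≤ L2 ∧ L2 < n ∧ 0 ≤ c - 1 ∧ c - 1 < n) ∧
      (0 ≤ L2 ∧ L2 < n ∧ 0 ≤ c ∧ c < n) ∧
      (0 ≤ L3 ∧ L3 < n ∧ 0 ≤ c - 3 ∧ c - 3 < n) ∧
      (0 ≤ L3 ∧ L3 < n ∧ 0 ≤ c - 2 ∧ c - 2 < n) ∧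
      (0 ≤ L3 ∧ L3 < n ∧ 0 ≤ c - 1 ∧ c - 1 < n) ∧
      (0 ≤ L3 ∧ L3 < n ∧ 0 ≤ c ∧ c < n)) h1
  · rfl

-- n < 4: every candidate stone is off board, A collects nothing
theorem ABlock_nil (tr : Bool) (n : Int) (hn : n < 4) : ABlock tr n = [] := by
  unfold ABlock
  have e1 : ∀ c ∈ PySem.List.pyRange 0 n 1,
      (optTry (gC tr n 3 c)
        [gC tr n 2 c, gC tr n 2 (c+1), gC tr n 1 c, gC tr n 1 (c+1), gC tr n 1 (c+2),
         gC tr n 0 c, gC tr n 0 (c+1), gC tr n 0 (c+2), gC tr n 0 (c+3)]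
        (gC tr n 2 c) (gC tr n 2 (c+1))
      ++ optTry (gC tr n 3 c)
        [gC tr n 2 (c-1), gC tr n 2 c, gC tr n 1 (c-2), gC tr n 1 (c-1), gC tr n 1 c,
         gC tr n 0 (c-3), gC tr n 0 (c-2), gC tr n 0 (c-1), gC tr n 0 c]
        (gC tr n 2 (c-1)) (gC tr n 2 c))
      = ([] : List (Int × List Int × Int × Int)) := by
    intro c _
    unfold optTry
    rw [if_neg (fun h => by have := (gC_nonneg tr n 3 c).mp h.1; omega),
        if_neg (fun h => by have := (gC_nonneg tr n 3 c).mp h.1; omega)]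
    rfl
  have e2 : ∀ c ∈ PySem.List.pyRange 0 n 1,
      (optTry (gC tr n (n-4) c)
        [gC tr n (n-3) (c-1), gC tr n (n-3) c, gC tr n (n-2) (c-2), gC tr n (n-2) (c-1), gC tr n (n-2) c,
         gC tr n (n-1) (c-3), gC tr n (n-1) (c-2), gC tr n (n-1) (c-1), gC tr n (n-1) c]
        (gC tr n (n-3) (c-1)) (gC tr n (n-3) c)
      ++ optTry (gC tr n (n-4) c)
        [gC tr n (n-3) c, gC tr n (n-3) (c+1), gC tr n (n-2) c, gC tr n (n-2) (c+1), gC tr n (n-2) (c+2),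
         gC tr n (n-1) c, gC tr n (n-1) (c+1), gC tr n (n-1) (c+2), gC tr n (n-1) (c+3)]
        (gC tr n (n-3) c) (gC tr n (n-3) (c+1)))
      = ([] : List (Int × List Int × Int × Int)) := by
    intro c _
    unfold optTry
    rw [if_neg (fun h => by have := (gC_nonneg tr n (n-4) c).mp h.1; omega),
        if_neg (fun h => by have := (gC_nonneg tr n (n-4) c).mp h.1; omega)]
    rfl
  rw [List.flatMap_congr e1, List.flatMap_congr e2]
  simp

-- ===== VERDICT (by name: the statement is the Claim_ definition above) =====
set_option maxHeartbeats 1000000 in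
theorem get_template_IV_instances_py_spec : Claim_equal_get_template_IV_instances_py := by
  intro n piece _
  unfold Spec_get_template_IV_instances_py
  rw [A_eq_ABlock]
  unfold get_template_IV_instances_py_alt
  by_cases hn : n < 4
  · rw [if_pos hn]
    exact ABlock_nil _ n hn
  · rw [if_neg hn]
    have h4 : 4 ≤ n := by omega
    simp only [pvInst_top_plus, pvInst_top_minus, pvInst_bot_minus, pvInst_bot_plus]
    have hmax : max (0:Int) 3 = 3 := by norm_num
    have htop := merge_fg (n := n)
      (f := fun s => (gL (piece == "R") n 3 s,
        [gL (piece == "R") n 2 s, gL (piece == "R") n 2 (s+1), gL (piece == "R") n 1 s,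
         gL (piece == "R") n 1 (s+1), gL (piece == "R") n 1 (s+2), gL (piece == "R") n 0 s,
         gL (piece == "R") n 0 (s+1), gL (piece == "R") n 0 (s+2), gL (piece == "R") n 0 (s+3)],
        gL (piece == "R") n 2 s, gL (piece == "R") n 2 (s+1)))
      (g := fun s => (gL (piece == "R") n 3 s,
        [gL (piece == "R") n 2 (s-1), gL (piece == "R") n 2 s, gL (piece == "R") n 1 (s-2),
         gL (piece == "R") n 1 (s-1), gL (piece == "R") n 1 s, gL (piece == "R") n 0 (s-3),
         gL (piece == "R") n 0 (s-2), gL (piece == "R") n 0 (s-1), gL (piece == "R") n 0 s],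
        gL (piece == "R") n 2 (s-1), gL (piece == "R") n 2 s)) 0
    rw [hmax] at htop
    have hbot := merge_gf (n := n)
      (f := fun s => (gL (piece == "R") n (n-4) s,
        [gL (piece == "R") n (n-3) s, gL (piece == "R") n (n-3) (s+1), gL (piece == "R") n (n-2) s,
         gL (piece == "R") n (n-2) (s+1), gL (piece == "R") n (n-2) (s+2), gL (piece == "R") n (n-1) s,
         gL (piece == "R") n (n-1) (s+1), gL (piece == "R") n (n-1) (s+2), gL (piece == "R") n (n-1) (s+3)],
        gL (piece == "R") n (n-3) s, gL (piece == "R") n (n-3) (s+1)))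
      (g := fun s => (gL (piece == "R") n (n-4) s,
        [gL (piece == "R") n (n-3) (s-1), gL (piece == "R") n (n-3) s, gL (piece == "R") n (n-2) (s-2),
         gL (piece == "R") n (n-2) (s-1), gL (piece == "R") n (n-2) s, gL (piece == "R") n (n-1) (s-3),
         gL (piece == "R") n (n-1) (s-2), gL (piece == "R") n (n-1) (s-1), gL (piece == "R") n (n-1) s],
        gL (piece == "R") n (n-3) (s-1), gL (piece == "R") n (n-3) s)) 0
    rw [hmax] at hbot
    rw [htop, hbot]
    unfold ABlock
    refine congrArg₂ (· ++ ·) ?_ ?_ <;> refine List.flatMap_congr ?_ <;> intro c hc <;>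
      obtain ⟨hc0, hcn⟩ := PySem.List.mem_pyRange_one.mp hc
    · rw [opt_plus (piece == "R") n 3 2 1 0 c (by omega) ⟨hc0, hcn⟩,
          opt_minus (piece == "R") n 3 2 1 0 c (by omega) ⟨hc0, hcn⟩]
    · rw [opt_minus (piece == "R") n (n-4) (n-3) (n-2) (n-1) c (by omega) ⟨hc0, hcn⟩,
          opt_plus (piece == "R") n (n-4) (n-3) (n-2) (n-1) c (by omega) ⟨hc0, hcn⟩]
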